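-- pv_equiv track=rewrite | github.com/1Franciscoluna1/Proyecto_Automatas | Proyecto2.py | contar_tokens
-- ===== SOURCE A (Python) =====
-- def contar_tokens(tokens):
--     conteo = {
--         'Palabras reservadas': 0,
--         'Identificadores': 0,
--         'Operadores Relacionales': 0,
--         'Operadores Lógicos': 0,
--         'Operadores Aritméticos': 0,
--         'Asignaciones': 0,
--         'Número Enteros': 0,
--         'Números Decimales': 0,
--         'Cadena de Caracteres': 0,
--         'Comentario Multilínea': 0,
--         'Comentario de Línea': 0,
--         'Paréntesis': 0,
--         'Llaves': 0,
--         'Errores': 0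
--     }
--     valores = {
--         'Palabras reservadas': [],
--         'Identificadores': [],
--         'Operadores Relacionales': [],
--         'Operadores Lógicos': [],
--         'Operadores Aritméticos': [],
--         'Asignaciones': [],
--         'Número Enteros': [],
--         'Números Decimales': [],
--         'Cadena de Caracteres': [],
--         'Comentario Multilínea': [],
--         'Comentario de Línea': [],
--         'Paréntesis': [],
--         'Llaves': [],
--         'Errores': []
--     }
--
--
--     for token in tokens:
--         if token in ['if', 'else', 'switch', 'case', 'default', 'for', 'while', 'break', 'int', 'String', 'double', 'char', 'print']:
--             conteo['Palabras reservadas'] += 1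
--             valores['Palabras reservadas'].append(token)
--         elif token[0].isalpha() and all(c.isalnum() or c == '_' for c in token):
--             conteo['Identificadores'] += 1
--             valores['Identificadores'].append(token)
--         elif token in ['<', '<=', '>', '>=', '==', '!=']:
--             conteo['Operadores Relacionales'] += 1
--             valores['Operadores Relacionales'].append(token)
--         elif token in ['&&', '||', '!']:
--             conteo['Operadores Lógicos'] += 1
--             valores['Operadores Lógicos'].append(token)
--         elif token in ['+', '-', '*', '/', '%']:
--             conteo['Operadores Aritméticos'] += 1
--             valores['Operadores Aritméticos'].append(token)
--         elif token == '=':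
--             conteo['Asignaciones'] += 1
--             valores['Asignaciones'].append(token)
--         elif token.isdigit():
--             conteo['Número Enteros'] += 1
--             valores['Número Enteros'].append(token)
--         elif '.' in token and all(part.isdigit() for part in token.split('.')):
--             conteo['Números Decimales'] += 1
--             valores['Números Decimales'].append(token)
--         elif token.startswith('"') and token.endswith('"'):
--             conteo['Cadena de Caracteres'] += 1
--             valores['Cadena de Caracteres'].append(token)
--         elif token.startswith('/*') and token.endswith('*/'):
--             conteo['Comentario Multilínea'] += 1
--             valores['Comentario Multilínea'].append(token)
--         elif token.startswith('//'):
--             conteo['Comentario de Línea'] += 1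
--             valores['Comentario de Línea'].append(token)
--         elif token in ['(', ')']:
--             conteo['Paréntesis'] += 1
--             valores['Paréntesis'].append(token)
--         elif token in ['{', '}']:
--             conteo['Llaves'] += 1
--             valores['Llaves'].append(token)
--         else:
--             conteo['Errores'] += 1
--             valores['Errores'].append(token)
--
--     return conteo, valores
-- ===== SOURCE B (Python) =====
-- # A pre-merged literal-token -> category lookup table replaces A's four membership
-- # scans and '=' test; tokens are classified once into a parallel list, and both
-- # result dicts are then built per category by grouping (no incremental mutation).
-- _CATS = ['Palabras reservadas', 'Identificadores', 'Operadores Relacionales',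
--          'Operadores Lógicos', 'Operadores Aritméticos', 'Asignaciones',
--          'Número Enteros', 'Números Decimales', 'Cadena de Caracteres',
--          'Comentario Multilínea', 'Comentario de Línea', 'Paréntesis',
--          'Llaves', 'Errores']
--
-- _LITERAL = {}
-- for _w in ['if', 'else', 'switch', 'case', 'default', 'for', 'while', 'break',
--            'int', 'String', 'double', 'char', 'print']:
--     _LITERAL[_w] = 'Palabras reservadas'
-- for _w in ['<', '<=', '>', '>=', '==', '!=']:
--     _LITERAL[_w] = 'Operadores Relacionales'
-- for _w in ['&&', '||', '!']:
--     _LITERAL[_w] = 'Operadores Lógicos'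
-- for _w in ['+', '-', '*', '/', '%']:
--     _LITERAL[_w] = 'Operadores Aritméticos'
-- _LITERAL['='] = 'Asignaciones'
-- for _w in ['(', ')']:
--     _LITERAL[_w] = 'Paréntesis'
-- for _w in ['{', '}']:
--     _LITERAL[_w] = 'Llaves'
--
--
-- def _clasificar(t):
--     cat = _LITERAL.get(t)
--     if cat is not None:
--         return cat
--     if t[0].isalpha() and all(c.isalnum() or c == '_' for c in t):
--         return 'Identificadores'
--     if t.isdigit():
--         return 'Número Enteros'
--     if '.' in t and all(p.isdigit() for p in t.split('.')):
--         return 'Números Decimales'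
--     if t.startswith('"') and t.endswith('"'):
--         return 'Cadena de Caracteres'
--     if t.startswith('/*') and t.endswith('*/'):
--         return 'Comentario Multilínea'
--     if t.startswith('//'):
--         return 'Comentario de Línea'
--     return 'Errores'
--
--
-- def contar_tokens(tokens):
--     cats = [_clasificar(t) for t in tokens]
--     valores = {c: [t for t, k in zip(tokens, cats) if k == c] for c in _CATS}
--     conteo = {c: len(v) for c, v in valores.items()}
--     return conteo, valores
-- ===== Notes on version B (the rewrite author's own statement) =====
-- stated objective: alternative
-- what changed: Replaces the 13-branch first-match elif ladder and incremental dict mutation with a pre-merged literal-token-to-category lookup dict plus a short fallback classifier, then builds both result dicts in a grouping stage (filter per category over the classified list) instead of mutating counters per token.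
import Mathlib
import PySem

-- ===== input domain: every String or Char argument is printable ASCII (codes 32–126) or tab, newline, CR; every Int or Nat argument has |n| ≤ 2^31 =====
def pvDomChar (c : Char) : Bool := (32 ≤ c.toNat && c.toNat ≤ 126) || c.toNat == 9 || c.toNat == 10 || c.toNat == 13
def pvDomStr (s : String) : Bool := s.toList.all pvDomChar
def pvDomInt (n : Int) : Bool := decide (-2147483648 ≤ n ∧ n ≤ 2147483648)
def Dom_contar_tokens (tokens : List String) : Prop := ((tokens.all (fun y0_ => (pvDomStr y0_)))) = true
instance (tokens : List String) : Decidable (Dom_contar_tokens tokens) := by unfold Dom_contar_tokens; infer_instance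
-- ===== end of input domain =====

-- B replaces A's 13-branch elif ladder + incremental dict mutation with a merged
-- literal-token lookup dict, a one-shot classification pass, and a per-category
-- grouping stage that builds both result dicts (objective: alternative algorithm).

-- ===== PORT A =====
-- the token tests of A's elif ladder; `t[0].isalpha()` via pyGet? (none only on "", excluded by Pre_)
def pvEsReservada (t : String) : Bool := (["if", "else", "switch", "case", "default", "for", "while", "break", "int", "String", "double", "char", "print"]).contains t
def pvEsIdentificador (t : String) : Bool := (((PySem.Str.pyGet? t 0).map PySem.Chars.isalpha).getD false && t.toList.all (fun c => PySem.Chars.isalnum c || c == '_'))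
def pvEsRelacional (t : String) : Bool := (["<", "<=", ">", ">=", "==", "!="]).contains t
def pvEsLogico (t : String) : Bool := (["&&", "||", "!"]).contains t
def pvEsAritmetico (t : String) : Bool := (["+", "-", "*", "/", "%"]).contains t
def pvEsAsignacion (t : String) : Bool := (t == "=")
def pvEsEntero (t : String) : Bool := PySem.Str.strIsdigit t
def pvEsDecimal (t : String) : Bool := (PySem.Str.isIn "." t && ((PySem.Str.split? t ".").getD []).all PySem.Str.strIsdigit)
def pvEsCadena (t : String) : Bool := (PySem.Str.startswith t "\"" && PySem.Str.endswith t "\"")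
def pvEsComentMulti (t : String) : Bool := (PySem.Str.startswith t "/*" && PySem.Str.endswith t "*/")
def pvEsComentLinea (t : String) : Bool := PySem.Str.startswith t "//"
def pvEsParentesis (t : String) : Bool := (["(", ")"]).contains t
def pvEsLlave (t : String) : Bool := (["{", "}"]).contains t

def pvStepA (st : PySem.Dict String Int × PySem.Dict String (List String)) (token : String) :
    PySem.Dict String Int × PySem.Dict String (List String) :=
  let upd := fun (cat : String) =>
    (st.1.modify cat 0 (· + 1), st.2.modify cat [] (· ++ [token]))
  if pvEsReservada token then upd "Palabras reservadas"
  else if pvEsIdentificador token then upd "Identificadores"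
  else if pvEsRelacional token then upd "Operadores Relacionales"
  else if pvEsLogico token then upd "Operadores Lógicos"
  else if pvEsAritmetico token then upd "Operadores Aritméticos"
  else if pvEsAsignacion token then upd "Asignaciones"
  else if pvEsEntero token then upd "Número Enteros"
  else if pvEsDecimal token then upd "Números Decimales"
  else if pvEsCadena token then upd "Cadena de Caracteres"
  else if pvEsComentMulti token then upd "Comentario Multilínea"
  else if pvEsComentLinea token then upd "Comentario de Línea"
  else if pvEsParentesis token then upd "Paréntesis"
  else if pvEsLlave token then upd "Llaves"
  else upd "Errores"

def contar_tokens (tokens : List String) : (List (String × Int)) × (List (String × List String)) :=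
  let conteo : PySem.Dict String Int := PySem.Dict.ofList
    [("Palabras reservadas", 0), ("Identificadores", 0), ("Operadores Relacionales", 0),
     ("Operadores Lógicos", 0), ("Operadores Aritméticos", 0), ("Asignaciones", 0),
     ("Número Enteros", 0), ("Números Decimales", 0), ("Cadena de Caracteres", 0),
     ("Comentario Multilínea", 0), ("Comentario de Línea", 0), ("Paréntesis", 0),
     ("Llaves", 0), ("Errores", 0)]
  let valores : PySem.Dict String (List String) := PySem.Dict.ofList
    [("Palabras reservadas", []), ("Identificadores", []), ("Operadores Relacionales", []),
     ("Operadores Lógicos", []), ("Operadores Aritméticos", []), ("Asignaciones", []),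
     ("Número Enteros", []), ("Números Decimales", []), ("Cadena de Caracteres", []),
     ("Comentario Multilínea", []), ("Comentario de Línea", []), ("Paréntesis", []),
     ("Llaves", []), ("Errores", [])]
  let fin := tokens.foldl pvStepA (conteo, valores)
  (fin.1.items, fin.2.items)

-- ===== PORT B =====
def pvCats : List String :=
  ["Palabras reservadas", "Identificadores", "Operadores Relacionales",
   "Operadores Lógicos", "Operadores Aritméticos", "Asignaciones",
   "Número Enteros", "Números Decimales", "Cadena de Caracteres",
   "Comentario Multilínea", "Comentario de Línea", "Paréntesis",
   "Llaves", "Errores"]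

-- Source B's _LITERAL dict, built in the same insertion order
def pvLiteral : PySem.Dict String String := PySem.Dict.ofList
  [("if", "Palabras reservadas"), ("else", "Palabras reservadas"), ("switch", "Palabras reservadas"),
   ("case", "Palabras reservadas"), ("default", "Palabras reservadas"), ("for", "Palabras reservadas"),
   ("while", "Palabras reservadas"), ("break", "Palabras reservadas"), ("int", "Palabras reservadas"),
   ("String", "Palabras reservadas"), ("double", "Palabras reservadas"), ("char", "Palabras reservadas"),
   ("print", "Palabras reservadas"),
   ("<", "Operadores Relacionales"), ("<=", "Operadores Relacionales"), (">", "Operadores Relacionales"),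
   (">=", "Operadores Relacionales"), ("==", "Operadores Relacionales"), ("!=", "Operadores Relacionales"),
   ("&&", "Operadores Lógicos"), ("||", "Operadores Lógicos"), ("!", "Operadores Lógicos"),
   ("+", "Operadores Aritméticos"), ("-", "Operadores Aritméticos"), ("*", "Operadores Aritméticos"),
   ("/", "Operadores Aritméticos"), ("%", "Operadores Aritméticos"),
   ("=", "Asignaciones"),
   ("(", "Paréntesis"), (")", "Paréntesis"),
   ("{", "Llaves"), ("}", "Llaves")]

def pvClasificar (t : String) : String :=
  match pvLiteral.get? t with
  | some cat => cat
  | none =>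
    if pvEsIdentificador t then "Identificadores"
    else if pvEsEntero t then "Número Enteros"
    else if pvEsDecimal t then "Números Decimales"
    else if pvEsCadena t then "Cadena de Caracteres"
    else if pvEsComentMulti t then "Comentario Multilínea"
    else if pvEsComentLinea t then "Comentario de Línea"
    else "Errores"

def contar_tokens_alt (tokens : List String) : (List (String × Int)) × (List (String × List String)) :=
  let cats := tokens.map pvClasificar
  let valores : List (String × List String) :=
    pvCats.map (fun c => (c, ((tokens.zip cats).filter (fun p => p.2 == c)).map Prod.fst))
  let conteo : List (String × Int) :=
    valores.map (fun p => (p.1, PySem.List.len p.2))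
  (conteo, valores)

-- ===== PRECONDITION & SPEC =====
-- Pre_ excludes token lists containing the empty string, on which both Pythons raise IndexError (token[0]).
def Pre_contar_tokens (tokens : List String) : Prop := "" ∉ tokens
instance (tokens : List String) : Decidable (Pre_contar_tokens tokens) := by unfold Pre_contar_tokens; infer_instance

def pvWitness_contar_tokens : List String := ["if", "x1", "1.5", "?"]

def Spec_contar_tokens (tokens : List String) (out : (List (String × Int)) × (List (String × List String))) : Prop := out = contar_tokens_alt tokens
instance (tokens : List String) (out : (List (String × Int)) × (List (String × List String))) : Decidable (Spec_contar_tokens tokens out) := by unfold Spec_contar_tokens; infer_instance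

-- ===== CLAIM (what is proved, stated in full; the proofs are below) =====
def Claim_equal_contar_tokens : Prop := ∀ (tokens : List String), Dom_contar_tokens tokens → Pre_contar_tokens tokens → Spec_contar_tokens tokens (contar_tokens tokens)

-- ===== LEMMAS AND PROOFS =====

lemma lit_none_of_pred (P : String → Bool) (t : String) (hP : P t = true)
    (hks : ∀ k ∈ pvLiteral.keys, P k = false) : pvLiteral.get? t = none := by
  rw [PySem.Dict.get?_eq_none_iff_not_mem_keys]
  intro hmem
  have := hks t hmem
  rw [hP] at this
  simp at this

lemma clas_reservada (t : String) (h : pvEsReservada t = true) :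
    pvClasificar t = "Palabras reservadas" := by
  simp [pvEsReservada] at h
  rcases h with rfl|rfl|rfl|rfl|rfl|rfl|rfl|rfl|rfl|rfl|rfl|rfl|rfl <;> decide

lemma clas_ident (t : String) (h1 : pvEsReservada t = false) (h2 : pvEsIdentificador t = true) :
    pvClasificar t = "Identificadores" := by
  have hnone : pvLiteral.get? t = none := by
    apply lit_none_of_pred (fun s => pvEsIdentificador s && !pvEsReservada s) t (by simp [h1, h2])
    decide
  simp [pvClasificar, hnone, h2]

lemma clas_relacional (t : String) (h : pvEsRelacional t = true) :
    pvClasificar t = "Operadores Relacionales" := by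
  simp [pvEsRelacional] at h
  rcases h with rfl|rfl|rfl|rfl|rfl|rfl <;> decide

lemma clas_logico (t : String) (h : pvEsLogico t = true) :
    pvClasificar t = "Operadores Lógicos" := by
  simp [pvEsLogico] at h
  rcases h with rfl|rfl|rfl <;> decide

lemma clas_aritmetico (t : String) (h : pvEsAritmetico t = true) :
    pvClasificar t = "Operadores Aritméticos" := by
  simp [pvEsAritmetico] at h
  rcases h with rfl|rfl|rfl|rfl|rfl <;> decide

lemma clas_asignacion (t : String) (h : pvEsAsignacion t = true) :
    pvClasificar t = "Asignaciones" := by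
  simp [pvEsAsignacion] at h
  subst h; decide

lemma clas_entero (t : String) (h2 : pvEsIdentificador t = false) (h : pvEsEntero t = true) :
    pvClasificar t = "Número Enteros" := by
  have hnone : pvLiteral.get? t = none := lit_none_of_pred pvEsEntero t h (by decide)
  simp [pvClasificar, hnone, h2, h]

lemma clas_decimal (t : String) (h2 : pvEsIdentificador t = false) (h7 : pvEsEntero t = false)
    (h : pvEsDecimal t = true) : pvClasificar t = "Números Decimales" := by
  have hnone : pvLiteral.get? t = none := lit_none_of_pred pvEsDecimal t h (by decide)
  simp [pvClasificar, hnone, h2, h7, h]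

lemma clas_cadena (t : String) (h2 : pvEsIdentificador t = false) (h7 : pvEsEntero t = false)
    (h8 : pvEsDecimal t = false) (h : pvEsCadena t = true) :
    pvClasificar t = "Cadena de Caracteres" := by
  have hnone : pvLiteral.get? t = none := lit_none_of_pred pvEsCadena t h (by decide)
  simp [pvClasificar, hnone, h2, h7, h8, h]

lemma clas_multi (t : String) (h2 : pvEsIdentificador t = false) (h7 : pvEsEntero t = false)
    (h8 : pvEsDecimal t = false) (h9 : pvEsCadena t = false) (h : pvEsComentMulti t = true) :
    pvClasificar t = "Comentario Multilínea" := by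
  have hnone : pvLiteral.get? t = none := lit_none_of_pred pvEsComentMulti t h (by decide)
  simp [pvClasificar, hnone, h2, h7, h8, h9, h]

lemma clas_linea (t : String) (h2 : pvEsIdentificador t = false) (h7 : pvEsEntero t = false)
    (h8 : pvEsDecimal t = false) (h9 : pvEsCadena t = false) (h10 : pvEsComentMulti t = false)
    (h : pvEsComentLinea t = true) : pvClasificar t = "Comentario de Línea" := by
  have hnone : pvLiteral.get? t = none := lit_none_of_pred pvEsComentLinea t h (by decide)
  simp [pvClasificar, hnone, h2, h7, h8, h9, h10, h]

lemma clas_parentesis (t : String) (h : pvEsParentesis t = true) :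
    pvClasificar t = "Paréntesis" := by
  simp [pvEsParentesis] at h
  rcases h with rfl|rfl <;> decide

lemma clas_llave (t : String) (h : pvEsLlave t = true) :
    pvClasificar t = "Llaves" := by
  simp [pvEsLlave] at h
  rcases h with rfl|rfl <;> decide

lemma clas_error (t : String) (h1 : pvEsReservada t = false) (h2 : pvEsIdentificador t = false)
    (h3 : pvEsRelacional t = false) (h4 : pvEsLogico t = false) (h5 : pvEsAritmetico t = false)
    (h6 : pvEsAsignacion t = false) (h7 : pvEsEntero t = false) (h8 : pvEsDecimal t = false)
    (h9 : pvEsCadena t = false) (h10 : pvEsComentMulti t = false) (h11 : pvEsComentLinea t = false)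
    (h12 : pvEsParentesis t = false) (h13 : pvEsLlave t = false) :
    pvClasificar t = "Errores" := by
  have hnone : pvLiteral.get? t = none := by
    apply lit_none_of_pred
      (fun s => !(pvEsReservada s || pvEsRelacional s || pvEsLogico s || pvEsAritmetico s ||
                  pvEsAsignacion s || pvEsParentesis s || pvEsLlave s)) t
      (by simp [h1, h3, h4, h5, h6, h12, h13])
    decide
  simp [pvClasificar, hnone, h2, h7, h8, h9, h10, h11]

theorem pvStepA_eq_clasificar (st : PySem.Dict String Int × PySem.Dict String (List String)) (t : String) :
    pvStepA st t = (st.1.modify (pvClasificar t) 0 (· + 1), st.2.modify (pvClasificar t) [] (· ++ [t])) := by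
  unfold pvStepA
  by_cases h1 : pvEsReservada t = true
  · simp only [h1, if_true, clas_reservada t h1]
  all_goals simp only [Bool.not_eq_true] at *
  all_goals simp only [h1, Bool.false_eq_true, if_false]
  by_cases h2 : pvEsIdentificador t = true
  · simp only [h2, if_true, clas_ident t h1 h2]
  all_goals simp only [Bool.not_eq_true] at *
  all_goals simp only [h2, Bool.false_eq_true, if_false]
  by_cases h3 : pvEsRelacional t = true
  · simp only [h3, if_true, clas_relacional t h3]
  all_goals simp only [Bool.not_eq_true] at *
  all_goals simp only [h3, Bool.false_eq_true, if_false]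
  by_cases h4 : pvEsLogico t = true
  · simp only [h4, if_true, clas_logico t h4]
  all_goals simp only [Bool.not_eq_true] at *
  all_goals simp only [h4, Bool.false_eq_true, if_false]
  by_cases h5 : pvEsAritmetico t = true
  · simp only [h5, if_true, clas_aritmetico t h5]
  all_goals simp only [Bool.not_eq_true] at *
  all_goals simp only [h5, Bool.false_eq_true, if_false]
  by_cases h6 : pvEsAsignacion t = true
  · simp only [h6, if_true, clas_asignacion t h6]
  all_goals simp only [Bool.not_eq_true] at *
  all_goals simp only [h6, Bool.false_eq_true, if_false]
  by_cases h7 : pvEsEntero t = true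
  · simp only [h7, if_true, clas_entero t h2 h7]
  all_goals simp only [Bool.not_eq_true] at *
  all_goals simp only [h7, Bool.false_eq_true, if_false]
  by_cases h8 : pvEsDecimal t = true
  · simp only [h8, if_true, clas_decimal t h2 h7 h8]
  all_goals simp only [Bool.not_eq_true] at *
  all_goals simp only [h8, Bool.false_eq_true, if_false]
  by_cases h9 : pvEsCadena t = true
  · simp only [h9, if_true, clas_cadena t h2 h7 h8 h9]
  all_goals simp only [Bool.not_eq_true] at *
  all_goals simp only [h9, Bool.false_eq_true, if_false]
  by_cases h10 : pvEsComentMulti t = true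
  · simp only [h10, if_true, clas_multi t h2 h7 h8 h9 h10]
  all_goals simp only [Bool.not_eq_true] at *
  all_goals simp only [h10, Bool.false_eq_true, if_false]
  by_cases h11 : pvEsComentLinea t = true
  · simp only [h11, if_true, clas_linea t h2 h7 h8 h9 h10 h11]
  all_goals simp only [Bool.not_eq_true] at *
  all_goals simp only [h11, Bool.false_eq_true, if_false]
  by_cases h12 : pvEsParentesis t = true
  · simp only [h12, if_true, clas_parentesis t h12]
  all_goals simp only [Bool.not_eq_true] at *
  all_goals simp only [h12, Bool.false_eq_true, if_false]
  by_cases h13 : pvEsLlave t = true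
  · simp only [h13, if_true, clas_llave t h13]
  all_goals simp only [Bool.not_eq_true] at *
  all_goals simp only [h13, Bool.false_eq_true, if_false]
  simp only [clas_error t h1 h2 h3 h4 h5 h6 h7 h8 h9 h10 h11 h12 h13]

lemma set_update_of_subset {α : Type} [BEq α] [LawfulBEq α] (s : PySem.Set α) (xs : List α)
    (h : ∀ x ∈ xs, x ∈ s) : PySem.Set.update s xs = s := by
  induction xs generalizing s with
  | nil => rfl
  | cons x xs ih =>
    have hx : PySem.Set.add s x = s := by
      simp [PySem.Set.add, PySem.Set.contains, h x (by simp)]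
    show PySem.Set.update (PySem.Set.add s x) xs = s
    rw [hx]
    exact ih s (fun y hy => h y (by simp [hy]))

lemma clas_mem (t : String) : pvClasificar t ∈ pvCats := by
  cases hg : pvLiteral.get? t with
  | some c =>
    rw [show pvClasificar t = c by unfold pvClasificar; rw [hg]]
    have hmem := PySem.Dict.mem_items_of_get?_eq_some _ hg
    simp only [show pvLiteral.items = [("if", "Palabras reservadas"), ("else", "Palabras reservadas"), ("switch", "Palabras reservadas"),
      ("case", "Palabras reservadas"), ("default", "Palabras reservadas"), ("for", "Palabras reservadas"),
      ("while", "Palabras reservadas"), ("break", "Palabras reservadas"), ("int", "Palabras reservadas"),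
      ("String", "Palabras reservadas"), ("double", "Palabras reservadas"), ("char", "Palabras reservadas"),
      ("print", "Palabras reservadas"),
      ("<", "Operadores Relacionales"), ("<=", "Operadores Relacionales"), (">", "Operadores Relacionales"),
      (">=", "Operadores Relacionales"), ("==", "Operadores Relacionales"), ("!=", "Operadores Relacionales"),
      ("&&", "Operadores Lógicos"), ("||", "Operadores Lógicos"), ("!", "Operadores Lógicos"),
      ("+", "Operadores Aritméticos"), ("-", "Operadores Aritméticos"), ("*", "Operadores Aritméticos"),
      ("/", "Operadores Aritméticos"), ("%", "Operadores Aritméticos"),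
      ("=", "Asignaciones"),
      ("(", "Paréntesis"), (")", "Paréntesis"),
      ("{", "Llaves"), ("}", "Llaves")] from rfl, List.mem_cons, List.not_mem_nil, or_false, Prod.mk.injEq] at hmem
    rcases hmem with ⟨-,rfl⟩|⟨-,rfl⟩|⟨-,rfl⟩|⟨-,rfl⟩|⟨-,rfl⟩|⟨-,rfl⟩|⟨-,rfl⟩|⟨-,rfl⟩|⟨-,rfl⟩|⟨-,rfl⟩|⟨-,rfl⟩|⟨-,rfl⟩|⟨-,rfl⟩|⟨-,rfl⟩|⟨-,rfl⟩|⟨-,rfl⟩|⟨-,rfl⟩|⟨-,rfl⟩|⟨-,rfl⟩|⟨-,rfl⟩|⟨-,rfl⟩|⟨-,rfl⟩|⟨-,rfl⟩|⟨-,rfl⟩|⟨-,rfl⟩|⟨-,rfl⟩|⟨-,rfl⟩|⟨-,rfl⟩|⟨-,rfl⟩|⟨-,rfl⟩|⟨-,rfl⟩|⟨-,rfl⟩ <;> simp [pvCats]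
  | none =>
    unfold pvClasificar
    rw [hg]
    split_ifs <;> decide

def pvC0 : PySem.Dict String Int := PySem.Dict.ofList
    [("Palabras reservadas", 0), ("Identificadores", 0), ("Operadores Relacionales", 0),
     ("Operadores Lógicos", 0), ("Operadores Aritméticos", 0), ("Asignaciones", 0),
     ("Número Enteros", 0), ("Números Decimales", 0), ("Cadena de Caracteres", 0),
     ("Comentario Multilínea", 0), ("Comentario de Línea", 0), ("Paréntesis", 0),
     ("Llaves", 0), ("Errores", 0)]

lemma cats_mem_getD0 (c : String) (hc : c ∈ pvCats) : pvC0.getD c 0 = 0 := by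
  simp only [pvCats, List.mem_cons, List.not_mem_nil, or_false] at hc
  rcases hc with rfl|rfl|rfl|rfl|rfl|rfl|rfl|rfl|rfl|rfl|rfl|rfl|rfl|rfl <;> decide

lemma conteo_items (tokens : List String) :
    (tokens.foldl (fun d t => d.modify (pvClasificar t) 0 (· + 1)) pvC0).items
      = pvCats.map (fun c => (c, ((tokens.map pvClasificar).count c : Int))) := by
  have hnd : (tokens.foldl (fun d t => d.modify (pvClasificar t) 0 (· + 1)) pvC0).keys.Nodup :=
    PySem.Dict.nodup_keys_foldl_modify_key tokens pvClasificar 0 (fun _ _ => (· + 1)) pvC0 (by decide)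
  have hkeys : (tokens.foldl (fun d t => d.modify (pvClasificar t) 0 (· + 1)) pvC0).keys = pvCats := by
    rw [PySem.Dict.keys_foldl_modify_key]
    rw [show pvC0.keys = pvCats from rfl]
    exact set_update_of_subset pvCats (tokens.map pvClasificar)
      (by intro x hx; rcases List.mem_map.mp hx with ⟨t, -, rfl⟩; exact clas_mem t)
  rw [PySem.Dict.items_eq_map_keys _ hnd 0, hkeys]
  apply List.map_congr_left
  intro c hc
  congr 1
  rw [← List.foldl_map (f := pvClasificar) (g := fun (d : PySem.Dict String Int) c => d.modify c 0 (· + 1))]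
  rw [PySem.Dict.getD_foldl_modify_add_one, cats_mem_getD0 c hc, zero_add]

def pvV0 : PySem.Dict String (List String) := PySem.Dict.ofList
    [("Palabras reservadas", []), ("Identificadores", []), ("Operadores Relacionales", []),
     ("Operadores Lógicos", []), ("Operadores Aritméticos", []), ("Asignaciones", []),
     ("Número Enteros", []), ("Números Decimales", []), ("Cadena de Caracteres", []),
     ("Comentario Multilínea", []), ("Comentario de Línea", []), ("Paréntesis", []),
     ("Llaves", []), ("Errores", [])]

lemma cats_mem_getDnil (c : String) (hc : c ∈ pvCats) : pvV0.getD c [] = [] := by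
  simp only [pvCats, List.mem_cons, List.not_mem_nil, or_false] at hc
  rcases hc with rfl|rfl|rfl|rfl|rfl|rfl|rfl|rfl|rfl|rfl|rfl|rfl|rfl|rfl <;> decide

lemma valores_items (tokens : List String) :
    (tokens.foldl (fun d t => d.modify (pvClasificar t) [] (· ++ [t])) pvV0).items
      = pvCats.map (fun c => (c,
          ((tokens.map (fun t => (pvClasificar t, t))).filter (fun p => p.1 == c)).map Prod.snd)) := by
  have hnd : (tokens.foldl (fun d t => d.modify (pvClasificar t) [] (· ++ [t])) pvV0).keys.Nodup :=
    PySem.Dict.nodup_keys_foldl_modify_key tokens pvClasificar [] (fun _ t => (· ++ [t])) pvV0 (by decide)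
  have hkeys : (tokens.foldl (fun d t => d.modify (pvClasificar t) [] (· ++ [t])) pvV0).keys = pvCats := by
    rw [PySem.Dict.keys_foldl_modify_key]
    rw [show pvV0.keys = pvCats from rfl]
    exact set_update_of_subset pvCats (tokens.map pvClasificar)
      (by intro x hx; rcases List.mem_map.mp hx with ⟨t, -, rfl⟩; exact clas_mem t)
  rw [PySem.Dict.items_eq_map_keys _ hnd [], hkeys]
  apply List.map_congr_left
  intro c hc
  congr 1
  rw [← List.foldl_map (f := fun t => (pvClasificar t, t)) (g := fun (d : PySem.Dict String (List String)) (p : String × String) => d.modify p.1 [] (· ++ [p.2]))]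
  rw [PySem.Dict.getD_foldl_modify_append, cats_mem_getDnil c hc, List.nil_append]

lemma zipFst_eq (tokens : List String) (c : String) :
    ((tokens.zip (tokens.map pvClasificar)).filter (fun p => p.2 == c)).map Prod.fst
      = tokens.filter (fun t => pvClasificar t == c) := by
  induction tokens with
  | nil => rfl
  | cons t ts ih =>
    simp only [List.map_cons, List.zip_cons_cons, List.filter_cons]
    by_cases h : (pvClasificar t == c) = true
    · simp [h, ih]
    · simp [h, ih]

lemma pairsSnd_eq (tokens : List String) (c : String) :
    ((tokens.map (fun t => (pvClasificar t, t))).filter (fun p => p.1 == c)).map Prod.snd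
      = tokens.filter (fun t => pvClasificar t == c) := by
  induction tokens with
  | nil => rfl
  | cons t ts ih =>
    simp only [List.map_cons, List.filter_cons]
    by_cases h : (pvClasificar t == c) = true
    · simp [h, ih]
    · simp [h, ih]

lemma count_filter (tokens : List String) (c : String) :
    (tokens.map pvClasificar).count c = (tokens.filter (fun t => pvClasificar t == c)).length := by
  induction tokens with
  | nil => rfl
  | cons t ts ih =>
    simp only [List.map_cons, List.count_cons, List.filter_cons]
    by_cases h : (pvClasificar t == c) = true
    · simp [h, ih]
    · simp [h, ih]

theorem main_eq (tokens : List String) : contar_tokens tokens = contar_tokens_alt tokens := by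
  simp only [contar_tokens, contar_tokens_alt]
  rw [show pvStepA = (fun st t => (st.1.modify (pvClasificar t) 0 (· + 1), st.2.modify (pvClasificar t) [] (· ++ [t])))
        from funext fun st => funext fun t => pvStepA_eq_clasificar st t]
  rw [PySem.List.foldl_prod_mk
        (f := fun (d : PySem.Dict String Int) t => d.modify (pvClasificar t) 0 (· + 1))
        (g := fun (d : PySem.Dict String (List String)) t => d.modify (pvClasificar t) [] (· ++ [t]))]
  rw [show (PySem.Dict.ofList
    [("Palabras reservadas", (0:Int)), ("Identificadores", 0), ("Operadores Relacionales", 0),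
     ("Operadores Lógicos", 0), ("Operadores Aritméticos", 0), ("Asignaciones", 0),
     ("Número Enteros", 0), ("Números Decimales", 0), ("Cadena de Caracteres", 0),
     ("Comentario Multilínea", 0), ("Comentario de Línea", 0), ("Paréntesis", 0),
     ("Llaves", 0), ("Errores", 0)] : PySem.Dict String Int) = pvC0 from rfl]
  rw [show (PySem.Dict.ofList
    [("Palabras reservadas", ([]:List String)), ("Identificadores", []), ("Operadores Relacionales", []),
     ("Operadores Lógicos", []), ("Operadores Aritméticos", []), ("Asignaciones", []),
     ("Número Enteros", []), ("Números Decimales", []), ("Cadena de Caracteres", []),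
     ("Comentario Multilínea", []), ("Comentario de Línea", []), ("Paréntesis", []),
     ("Llaves", []), ("Errores", [])] : PySem.Dict String (List String)) = pvV0 from rfl]
  rw [conteo_items, valores_items]
  rw [Prod.mk.injEq]
  constructor
  · rw [List.map_map]
    apply List.map_congr_left
    intro c _
    simp only [Function.comp, PySem.List.len_eq, zipFst_eq, count_filter]
  · apply List.map_congr_left
    intro c _
    rw [pairsSnd_eq, zipFst_eq]

-- ===== VERDICT (by name: the statement is the Claim_ definition above) =====
theorem contar_tokens_spec : Claim_equal_contar_tokens := by
  intro tokens _ _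
  exact main_eq tokens
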